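-- pv_equiv track=rewrite | github.com/murilorrr/restaurant-orders | src/analyze_log.py | prato_mais_pedido_por_maria
-- ===== SOURCE A (Python) =====
-- def prato_mais_pedido_por_maria(array):
--     count = {}
--     maria_orders = [row for row in array if row['nome'] == 'maria']
--     max_value = maria_orders[0]['comida']
--     for row in maria_orders:
--         if row['comida'] not in count:
--             count[row['comida']] = 1
--         if row['comida'] in count:
--             count[row['comida']] += 1
--         if count[row['comida']] > count[max_value]:
--             max_value = row['comida']
--     return max_value
-- ===== SOURCE B (Python) =====
-- def prato_mais_pedido_por_maria(array):
--     dishes = [row['comida'] for row in array if row['nome'] == 'maria']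
--     freq = {}
--     for dish in dishes:
--         freq[dish] = freq.get(dish, 0) + 1
--     top = max(freq.values())
--     run = {}
--     for dish in dishes:
--         run[dish] = run.get(dish, 0) + 1
--         if run[dish] == top:
--             return dish
-- ===== Notes on version B (the rewrite author's own statement) =====
-- stated objective: alternative
-- what changed: A keeps a running leader with (oddly shifted) counts in one pass; B first builds a plain frequency table to get the maximum count, then rescans the dish list and returns the first dish whose running count reaches that maximum (same first-to-reach tie-break).
import Mathlib
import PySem

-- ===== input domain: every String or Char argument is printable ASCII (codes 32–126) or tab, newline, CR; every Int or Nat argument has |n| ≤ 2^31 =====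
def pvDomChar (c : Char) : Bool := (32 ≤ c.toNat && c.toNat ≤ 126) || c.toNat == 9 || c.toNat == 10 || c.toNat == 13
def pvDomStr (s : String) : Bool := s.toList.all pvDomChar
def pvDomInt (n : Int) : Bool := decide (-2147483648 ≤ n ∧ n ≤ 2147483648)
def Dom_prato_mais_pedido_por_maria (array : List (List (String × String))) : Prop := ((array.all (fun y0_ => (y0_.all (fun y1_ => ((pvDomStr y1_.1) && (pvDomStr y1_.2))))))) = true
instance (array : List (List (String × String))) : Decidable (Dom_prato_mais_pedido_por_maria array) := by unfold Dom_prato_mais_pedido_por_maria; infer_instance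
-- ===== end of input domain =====

-- B rebuilds A's answer in two plain passes (frequency table + first dish whose running count
-- reaches the maximum) instead of A's single pass with a running leader over shifted counts.

-- row['nome'] == 'maria'  (missing 'nome' key raises in Python; Pre_ excludes it)
def pvIsMaria (row : List (String × String)) : Bool :=
  (PySem.Dict.mk row).get? "nome" == some "maria"

-- row['comida']  (missing key raises in Python; Pre_ excludes it, so the "" default is never used)
def pvDish (row : List (String × String)) : String :=
  ((PySem.Dict.mk row).get? "comida").getD ""

-- ===== PORT A =====
-- one loop iteration of A over a maria row's dish c: the odd first-occurrence handling
-- (set to 1, then immediately += 1) is kept literally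
def pvStepA (st : PySem.Dict String Int × String) (c : String) :
    PySem.Dict String Int × String :=
  let count := st.1
  let count := if count.contains c then count else count.insert c (1 : Int)
  let count := if count.contains c then count.modify c 0 (· + 1) else count
  let mv := if count.getD c 0 > count.getD st.2 0 then c else st.2
  (count, mv)

def prato_mais_pedido_por_maria (array : List (List (String × String))) : String :=
  let maria_orders := array.filter pvIsMaria
  -- maria_orders[0]['comida'] : IndexError on empty maria_orders, excluded by Pre_
  let max_value := pvDish (maria_orders.headD [])
  (maria_orders.foldl (fun st row => pvStepA st (pvDish row))
    (PySem.Dict.empty, max_value)).2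

-- ===== PORT B =====
-- second pass of B: running counts per dish, return the first dish whose count reaches top
-- (Python falls off returning None only when no dish reaches top, impossible under Pre_)
def pvFindFirst (top : Int) (run : PySem.Dict String Int) : List String → String
  | [] => ""
  | d :: rest =>
      let run' := run.insert d (run.getD d 0 + 1)
      if run'.getD d 0 == top then d else pvFindFirst top run' rest

def prato_mais_pedido_por_maria_alt (array : List (List (String × String))) : String :=
  let dishes := (array.filter pvIsMaria).map pvDish
  let freq := dishes.foldl (fun d x => d.insert x (d.getD x 0 + 1)) PySem.Dict.empty
  -- max(freq.values()) : ValueError on empty, excluded by Pre_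
  let top := (PySem.List.max? freq.values (fun v => v)).getD 0
  pvFindFirst top PySem.Dict.empty dishes

-- ===== PRECONDITION & SPEC =====
-- Pre_ excludes exactly the inputs where A raises: a row without a 'nome' key (KeyError),
-- no maria row at all (IndexError on maria_orders[0]), or a maria row without 'comida' (KeyError).
def Pre_prato_mais_pedido_por_maria (array : List (List (String × String))) : Prop :=
  (∀ row ∈ array, ((PySem.Dict.mk row).get? "nome").isSome = true) ∧
  array.filter pvIsMaria ≠ [] ∧
  (∀ row ∈ array.filter pvIsMaria, ((PySem.Dict.mk row).get? "comida").isSome = true)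
instance (array : List (List (String × String))) : Decidable (Pre_prato_mais_pedido_por_maria array) := by
  unfold Pre_prato_mais_pedido_por_maria; infer_instance

def pvWitness_prato_mais_pedido_por_maria : (List (List (String × String))) :=
  [[("nome", "maria"), ("comida", "x")]]

def Spec_prato_mais_pedido_por_maria (array : List (List (String × String))) (out : String) : Prop := out = prato_mais_pedido_por_maria_alt array
instance (array : List (List (String × String))) (out : String) : Decidable (Spec_prato_mais_pedido_por_maria array out) := by unfold Spec_prato_mais_pedido_por_maria; infer_instance

-- ===== CLAIM (what is proved, stated in full; the proofs are below) =====
def Claim_equal_prato_mais_pedido_por_maria : Prop := ∀ (array : List (List (String × String))), Dom_prato_mais_pedido_por_maria array → Pre_prato_mais_pedido_por_maria array → Spec_prato_mais_pedido_por_maria array (prato_mais_pedido_por_maria array)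

-- ===== LEMMAS AND PROOFS =====

-- A's dict stores count+1 for a dish present in the processed prefix, nothing otherwise
def pvShift (n : Nat) : Int := if n = 0 then 0 else (n : Int) + 1

-- max of f over a list, starting from 0
def pvMaxOf (f : String → Int) (l : List String) : Int :=
  l.foldl (fun acc d => max acc (f d)) 0

-- the maximum multiplicity in p (0 for [])
def pvMaxRun (p : List String) : Int := pvMaxOf (fun d => (p.count d : Int)) p

-- pure version of B's second pass: first d whose running count (over cnt) reaches top
def pvFr (cnt : String → Int) (top : Int) : List String → Option String
  | [] => none
  | d :: rest =>
      if cnt d + 1 = top then some d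
      else pvFr (fun x => if x = d then cnt d + 1 else cnt x) top rest

lemma pvMaxOf_eq_foldl_map (f : String → Int) (l : List String) :
    pvMaxOf f l = (l.map f).foldl max 0 := by
  simp [pvMaxOf, List.foldl_map]

lemma pvMaxOf_nonneg (f : String → Int) (l : List String) : 0 ≤ pvMaxOf f l :=
  (PySem.List.le_foldl_max_int l f 0).1

lemma pvLe_maxOf (f : String → Int) (l : List String) {d : String} (hd : d ∈ l) :
    f d ≤ pvMaxOf f l :=
  (PySem.List.le_foldl_max_int l f 0).2 d hd

lemma pvMaxOf_le (f : String → Int) (l : List String) {B : Int} (h0 : 0 ≤ B)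
    (h : ∀ d ∈ l, f d ≤ B) : pvMaxOf f l ≤ B := by
  rw [pvMaxOf_eq_foldl_map]
  rcases PySem.List.foldl_max_mem (l.map f) 0 with h0' | hm
  · rw [h0']; exact h0
  · obtain ⟨d, hd, hfd⟩ := List.mem_map.mp hm
    rw [← hfd]; exact h d hd

lemma pvCount_le_maxRun (p : List String) (d : String) :
    (p.count d : Int) ≤ pvMaxRun p := by
  by_cases hd : d ∈ p
  · exact pvLe_maxOf _ p hd
  · simp [List.count_eq_zero_of_not_mem hd]
    exact pvMaxOf_nonneg _ p

lemma pvMaxOf_append_singleton (f : String → Int) (l : List String) (c : String) :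
    pvMaxOf f (l ++ [c]) = max (pvMaxOf f l) (f c) := by
  simp [pvMaxOf, List.foldl_append]

lemma pvMaxRun_append (p : List String) (c : String) :
    pvMaxRun (p ++ [c]) = max (pvMaxRun p) ((p.count c : Int) + 1) := by
  have hc1 : (((p ++ [c]).count c : Nat) : Int) = (p.count c : Int) + 1 := by
    simp [List.count_append]
  have hcne : ∀ d, d ≠ c → (((p ++ [c]).count d : Nat) : Int) = (p.count d : Int) := by
    intro d h; simp [List.count_append, Ne.symm h]
  unfold pvMaxRun
  rw [pvMaxOf_append_singleton, hc1]
  apply le_antisymm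
  · apply max_le
    · apply pvMaxOf_le
      · exact le_trans (pvMaxOf_nonneg _ p) (le_max_left _ _)
      · intro d hd
        by_cases h : d = c
        · subst h; rw [hc1]; exact le_max_right _ _
        · rw [hcne d h]; exact le_trans (pvLe_maxOf _ p hd) (le_max_left _ _)
    · exact le_max_right _ _
  · apply max_le
    · refine le_trans ?_ (le_max_left _ _)
      apply pvMaxOf_le
      · exact pvMaxOf_nonneg _ _
      · intro d hd
        have hle := pvLe_maxOf (fun d => (((p ++ [c]).count d : Nat) : Int)) p hd
        simp only at hle
        by_cases h : d = c
        · subst h; rw [hc1] at hle; omega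
        · rw [hcne d h] at hle; exact hle
    · exact le_max_right _ _

-- B's dict pass equals the pure pass
lemma pvFindFirst_eq (l : List String) (run : PySem.Dict String Int)
    (cnt : String → Int) (top : Int) (h : ∀ x, run.getD x 0 = cnt x) :
    pvFindFirst top run l = (pvFr cnt top l).getD "" := by
  induction l generalizing run cnt with
  | nil => simp [pvFindFirst, pvFr]
  | cons d rest ih =>
    have hd : (run.insert d (run.getD d 0 + 1)).getD d 0 = cnt d + 1 := by
      rw [PySem.Dict.getD_insert_self, h d]
    simp only [pvFindFirst, pvFr, hd]
    by_cases hc : cnt d + 1 = top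
    · simp [hc]
    · have : (cnt d + 1 == top) = false := by simp [hc]
      simp only [this, if_neg hc, Bool.false_eq_true, if_false, Option.getD]
      apply ih
      intro x
      by_cases hx : x = d
      · subst hx; rw [PySem.Dict.getD_insert_self, h x]; simp
      · rw [PySem.Dict.getD_insert, if_neg hx, h x, if_neg hx]

lemma pvFr_append (l1 l2 : List String) (cnt : String → Int) (top : Int) :
    pvFr cnt top (l1 ++ l2) =
      match pvFr cnt top l1 with
      | some x => some x
      | none => pvFr (fun x => cnt x + (l1.count x : Int)) top l2 := by
  induction l1 generalizing cnt with
  | nil => simp [pvFr]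
  | cons d rest ih =>
    simp only [List.cons_append, pvFr]
    by_cases hc : cnt d + 1 = top
    · simp [hc]
    · rw [if_neg hc, if_neg hc, ih]
      have : (fun x => (if x = d then cnt d + 1 else cnt x) + (rest.count x : Int))
           = (fun x => cnt x + ((d :: rest).count x : Int)) := by
        funext x
        by_cases hx : x = d
        · subst hx; simp; ring
        · have hcx : (((d :: rest).count x : Nat) : Int) = (rest.count x : Int) := by
            simp [Ne.symm hx]
          rw [if_neg hx, hcx]
      rw [this]

lemma pvFr_none (l : List String) (cnt : String → Int) (top : Int)
    (h : ∀ d ∈ l, cnt d + (l.count d : Int) < top) : pvFr cnt top l = none := by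
  induction l generalizing cnt with
  | nil => simp [pvFr]
  | cons d rest ih =>
    have hd := h d List.mem_cons_self
    have hcd : (d :: rest).count d = rest.count d + 1 := by simp
    rw [pvFr, if_neg (by rw [hcd] at hd; omega)]
    apply ih
    intro x hx
    have hh := h x (List.mem_cons_of_mem _ hx)
    by_cases hxd : x = d
    · subst hxd
      rw [hcd] at hh; push_cast at hh
      simp only []; omega
    · have hcx : (d :: rest).count x = rest.count x := by
        simp [Ne.symm hxd]
      rw [hcx] at hh
      rw [if_neg hxd]; omega

lemma pvShift_succ (n : Nat) : pvShift (n + 1) = (n : Int) + 2 := by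
  unfold pvShift
  rw [if_neg (by omega)]
  push_cast; ring

lemma pvShift_lt_iff (a b : Nat) (ha : 1 ≤ a) (hb : 1 ≤ b) :
    (pvShift a < pvShift b) ↔ a < b := by
  unfold pvShift
  rw [if_neg (by omega), if_neg (by omega)]
  omega

-- one step of A's loop, characterised: the dict keeps shifted multiplicities of the
-- processed prefix, and the leader changes exactly when the new shifted count exceeds it
lemma pvStepA_char (cnt : PySem.Dict String Int) (mv c : String) (p : List String)
    (Hg : ∀ d, cnt.getD d 0 = pvShift (p.count d))
    (Hc : ∀ d, cnt.contains d = decide (p.count d ≠ 0)) :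
    (∀ d, (pvStepA (cnt, mv) c).1.getD d 0 = pvShift ((p ++ [c]).count d)) ∧
    (∀ d, (pvStepA (cnt, mv) c).1.contains d = decide ((p ++ [c]).count d ≠ 0)) ∧
    (pvStepA (cnt, mv) c).2 =
      (if pvShift ((p ++ [c]).count mv) < pvShift ((p ++ [c]).count c) then c else mv) := by
  have hcc : (p ++ [c]).count c = p.count c + 1 := by simp [List.count_append]
  have hcd : ∀ d, d ≠ c → (p ++ [c]).count d = p.count d := by
    intro d h; simp [List.count_append, Ne.symm h]
  by_cases hin : p.count c = 0
  · have hnc : cnt.contains c = false := by rw [Hc c]; simp [hin]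
    have h2 : pvStepA (cnt, mv) c =
        (((cnt.insert c 1).modify c 0 (· + 1)),
         if ((cnt.insert c 1).modify c 0 (· + 1)).getD mv 0 <
            ((cnt.insert c 1).modify c 0 (· + 1)).getD c 0 then c else mv) := by
      simp only [pvStepA, hnc, PySem.Dict.contains_insert_self, Bool.false_eq_true,
        if_false, if_true, gt_iff_lt]
    have hg' : ∀ d, ((cnt.insert c 1).modify c 0 (· + 1)).getD d 0
        = pvShift ((p ++ [c]).count d) := by
      intro d
      rw [PySem.Dict.getD_modify]
      by_cases h : d = c
      · subst h
        rw [if_pos rfl, PySem.Dict.getD_insert_self, hcc, hin]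
        simp [pvShift]
      · rw [if_neg h, PySem.Dict.getD_insert, if_neg h, Hg d, hcd d h]
    have hc' : ∀ d, ((cnt.insert c 1).modify c 0 (· + 1)).contains d
        = decide ((p ++ [c]).count d ≠ 0) := by
      intro d
      rw [PySem.Dict.contains_modify, PySem.Dict.contains_insert]
      by_cases h : d = c
      · subst h; simp [hcc]
      · simp [h, Hc d, hcd d h]
    refine ⟨by rw [h2]; exact hg', by rw [h2]; exact hc', ?_⟩
    rw [h2]
    simp only [hg' c, hg' mv]
  · have hyc : cnt.contains c = true := by rw [Hc c]; simp [hin]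
    have h2 : pvStepA (cnt, mv) c =
        ((cnt.modify c 0 (· + 1)),
         if (cnt.modify c 0 (· + 1)).getD mv 0 <
            (cnt.modify c 0 (· + 1)).getD c 0 then c else mv) := by
      simp only [pvStepA, hyc, if_true, gt_iff_lt]
    have hg' : ∀ d, (cnt.modify c 0 (· + 1)).getD d 0 = pvShift ((p ++ [c]).count d) := by
      intro d
      rw [PySem.Dict.getD_modify]
      by_cases h : d = c
      · subst h
        rw [if_pos rfl, Hg d, hcc, pvShift_succ]
        unfold pvShift
        rw [if_neg hin]
        ring
      · rw [if_neg h, Hg d, hcd d h]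
    have hc' : ∀ d, (cnt.modify c 0 (· + 1)).contains d = decide ((p ++ [c]).count d ≠ 0) := by
      intro d
      rw [PySem.Dict.contains_modify]
      by_cases h : d = c
      · subst h; simp [hcc, Hc d, hin]
      · simp [h, Hc d, hcd d h]
    refine ⟨by rw [h2]; exact hg', by rw [h2]; exact hc', ?_⟩
    rw [h2]
    simp only [hg' c, hg' mv]

-- the main loop invariant of A's fold
lemma pvMain (rest : List String) : ∀ (p : List String) (cnt : PySem.Dict String Int) (mv : String),
    p ≠ [] →
    (∀ d, cnt.getD d 0 = pvShift (p.count d)) →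
    (∀ d, cnt.contains d = decide (p.count d ≠ 0)) →
    ((p.count mv : Int) = pvMaxRun p) →
    pvFr (fun _ => 0) (pvMaxRun p) p = some mv →
    (rest.foldl pvStepA (cnt, mv)).2 =
      (pvFr (fun _ => 0) (pvMaxRun (p ++ rest)) (p ++ rest)).getD "" := by
  induction rest with
  | nil =>
    intro p cnt mv hp Hg Hc I3 I4
    simp [List.foldl, I4]
  | cons c rest' ih =>
    intro p cnt mv hp Hg Hc I3 I4
    have hM1 : (1 : Int) ≤ pvMaxRun p := by
      obtain ⟨e, t, rfl⟩ : ∃ e t, p = e :: t := by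
        cases p with
        | nil => exact absurd rfl hp
        | cons e t => exact ⟨e, t, rfl⟩
      have h1 : 0 < (e :: t).count e := List.count_pos_iff.mpr List.mem_cons_self
      have h2 := pvCount_le_maxRun (e :: t) e
      omega
    have hcc : (p ++ [c]).count c = p.count c + 1 := by simp [List.count_append]
    have hcd : ∀ d, d ≠ c → (p ++ [c]).count d = p.count d := by
      intro d h; simp [List.count_append, Ne.symm h]
    have h1mv : 1 ≤ p.count mv := by
      have := I3; omega
    obtain ⟨Hg', Hc', Hmv'⟩ := pvStepA_char cnt mv c p Hg Hc
    have hMR := pvMaxRun_append p c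
    rw [List.foldl_cons]
    have hpair : pvStepA (cnt, mv) c = ((pvStepA (cnt, mv) c).1, (pvStepA (cnt, mv) c).2) := rfl
    rw [hpair, Hmv']
    by_cases hbig : pvMaxRun p < (p.count c : Int) + 1
    · -- the new dish strictly beats the old maximum: it becomes the leader
      have hcM : ((p ++ [c]).count c : Int) = pvMaxRun p + 1 := by
        have := pvCount_le_maxRun p c
        rw [hcc]; push_cast; omega
      have hMR' : pvMaxRun (p ++ [c]) = pvMaxRun p + 1 := by
        rw [hMR]; omega
      have hcond : pvShift ((p ++ [c]).count mv) < pvShift ((p ++ [c]).count c)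
          ↔ (p ++ [c]).count mv < (p ++ [c]).count c := by
        apply pvShift_lt_iff
        · by_cases h : mv = c
          · subst h; omega
          · rw [hcd mv h]; omega
        · omega
      have hifc : (if pvShift ((p ++ [c]).count mv) < pvShift ((p ++ [c]).count c)
          then c else mv) = c := by
        by_cases h : mv = c
        · subst h; split <;> rfl
        · rw [if_pos]
          rw [hcond, hcd mv h]
          have : ((p ++ [c]).count c : Int) = pvMaxRun p + 1 := hcM
          omega
      rw [hifc]
      have hfr' : pvFr (fun _ => 0) (pvMaxRun (p ++ [c])) (p ++ [c]) = some c := by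
        rw [pvFr_append]
        have hnone : pvFr (fun _ => 0) (pvMaxRun (p ++ [c])) p = none := by
          apply pvFr_none
          intro d hd
          have := pvCount_le_maxRun p d
          rw [hMR']; omega
        rw [hnone]
        simp only [pvFr]
        rw [if_pos (by rw [hMR']; omega)]
      have := ih (p ++ [c]) (pvStepA (cnt, mv) c).1 c (by simp) Hg' Hc'
        (by rw [hcM, hMR']) hfr'
      rw [List.append_assoc] at this
      simpa using this
    · -- the maximum is unchanged and so is the leader
      have hMR' : pvMaxRun (p ++ [c]) = pvMaxRun p := by rw [hMR]; omega
      have hifc : (if pvShift ((p ++ [c]).count mv) < pvShift ((p ++ [c]).count c)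
          then c else mv) = mv := by
        by_cases h : mv = c
        · subst h; split <;> rfl
        · rw [if_neg]
          rw [pvShift_lt_iff _ _ (by rw [hcd mv h]; omega) (by omega), hcd mv h]
          omega
      rw [hifc]
      have hI3' : (((p ++ [c]).count mv : Nat) : Int) = pvMaxRun (p ++ [c]) := by
        by_cases h : mv = c
        · subst h; rw [hcc, hMR']; push_cast; omega
        · rw [hcd mv h, hMR']; exact I3
      have hfr' : pvFr (fun _ => 0) (pvMaxRun (p ++ [c])) (p ++ [c]) = some mv := by
        rw [pvFr_append, hMR', I4]
      have := ih (p ++ [c]) (pvStepA (cnt, mv) c).1 mv (by simp) Hg' Hc' hI3' hfr'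
      rw [List.append_assoc] at this
      simpa using this

-- B's top is the maximum multiplicity
lemma pvTop_eq (ds : List String) (hds : ds ≠ []) :
    (PySem.List.max?
        ((ds.foldl (fun d x => d.insert x (d.getD x 0 + 1)) PySem.Dict.empty).values)
        (fun v => v)).getD 0 = pvMaxRun ds := by
  rw [PySem.Dict.foldl_insert_getD_add_one_eq_counter]
  have hvals : (PySem.Dict.counter ds).values
      = (PySem.Set.ofList ds).map (fun k => (ds.count k : Int)) := by
    simp [PySem.Dict.values, PySem.Dict.items_counter, List.map_map, Function.comp]
  rw [hvals]
  have hSne : (PySem.Set.ofList ds).map (fun k => (ds.count k : Int)) ≠ [] := by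
    simp only [ne_eq, List.map_eq_nil_iff]
    intro h
    obtain ⟨d0, tl, rfl⟩ : ∃ d0 tl, ds = d0 :: tl := by
      cases ds with
      | nil => exact absurd rfl hds
      | cons d0 tl => exact ⟨d0, tl, rfl⟩
    have : d0 ∈ PySem.Set.ofList (d0 :: tl) := by
      rw [PySem.Set.mem_ofList]; exact List.mem_cons_self
    rw [h] at this; simp at this
  obtain ⟨m, hm⟩ : ∃ m, PySem.List.max?
      ((PySem.Set.ofList ds).map (fun k => (ds.count k : Int))) (fun v => v) = some m := by
    cases hmm : PySem.List.max?
        ((PySem.Set.ofList ds).map (fun k => (ds.count k : Int))) (fun v => v) with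
    | none => exact absurd ((PySem.List.max?_eq_none_iff _ _).mp hmm) hSne
    | some m => exact ⟨m, rfl⟩
  rw [hm, Option.getD_some]
  have hmem := PySem.List.max?_mem hm
  have hmax := PySem.List.max?_isMax hm
  obtain ⟨k, hk, hkm⟩ := List.mem_map.mp hmem
  apply le_antisymm
  · rw [← hkm]; exact pvCount_le_maxRun ds k
  · apply pvMaxOf_le
    · rw [← hkm]; positivity
    · intro d hd
      have : (ds.count d : Int) ∈ (PySem.Set.ofList ds).map (fun k => (ds.count k : Int)) :=
        List.mem_map.mpr ⟨d, (PySem.Set.mem_ofList _ _).mpr hd, rfl⟩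
      exact hmax _ this

-- ===== VERDICT (by name: the statement is the Claim_ definition above) =====
theorem prato_mais_pedido_por_maria_spec : Claim_equal_prato_mais_pedido_por_maria := by
  intro array _ hpre
  obtain ⟨-, hne, -⟩ := hpre
  unfold Spec_prato_mais_pedido_por_maria
  simp only [prato_mais_pedido_por_maria, prato_mais_pedido_por_maria_alt]
  obtain ⟨r0, mrest, hm⟩ : ∃ r0 t, array.filter pvIsMaria = r0 :: t := by
    cases hmm : array.filter pvIsMaria with
    | nil => exact absurd hmm hne
    | cons r0 t => exact ⟨r0, t, rfl⟩
  rw [hm]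
  have hfold : (r0 :: mrest).foldl (fun st row => pvStepA st (pvDish row))
        (PySem.Dict.empty, pvDish ((r0 :: mrest).headD []))
      = ((r0 :: mrest).map pvDish).foldl pvStepA
        (PySem.Dict.empty, pvDish ((r0 :: mrest).headD [])) :=
    (List.foldl_map (f := pvDish) (g := pvStepA)).symm
  rw [hfold]
  have hds : ((r0 :: mrest).map pvDish) = pvDish r0 :: mrest.map pvDish := by simp
  rw [hds]
  have hHg0 : ∀ d, (PySem.Dict.empty : PySem.Dict String Int).getD d 0
      = pvShift (([] : List String).count d) := by
    intro d; simp [pvShift, PySem.Dict.getD_empty]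
  have hHc0 : ∀ d, (PySem.Dict.empty : PySem.Dict String Int).contains d
      = decide ((([] : List String).count d) ≠ 0) := by
    intro d; simp [PySem.Dict.contains_empty]
  obtain ⟨Hg1, Hc1, Hmv1⟩ := pvStepA_char PySem.Dict.empty (pvDish r0) (pvDish r0) [] hHg0 hHc0
  have hst2 : (pvStepA (PySem.Dict.empty, pvDish r0) (pvDish r0)).2 = pvDish r0 := by
    rw [Hmv1]; split <;> rfl
  have hcnt1 : ∀ d, (pvStepA (PySem.Dict.empty, pvDish r0) (pvDish r0)).1.getD d 0
      = pvShift (([pvDish r0] : List String).count d) := by simpa using Hg1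
  have hcontains1 : ∀ d, (pvStepA (PySem.Dict.empty, pvDish r0) (pvDish r0)).1.contains d
      = decide ((([pvDish r0] : List String).count d) ≠ 0) := by simpa using Hc1
  have hmr1 : pvMaxRun [pvDish r0] = 1 := by
    simp [pvMaxRun, pvMaxOf]
  have hI3 : ((([pvDish r0] : List String).count (pvDish r0) : Nat) : Int)
      = pvMaxRun [pvDish r0] := by
    rw [hmr1]; simp
  have hI4 : pvFr (fun _ => 0) (pvMaxRun [pvDish r0]) [pvDish r0] = some (pvDish r0) := by
    rw [hmr1]; simp [pvFr]
  have hmain := pvMain (mrest.map pvDish) [pvDish r0]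
    (pvStepA (PySem.Dict.empty, pvDish r0) (pvDish r0)).1 (pvDish r0)
    (by simp) hcnt1 hcontains1 hI3 hI4
  have hstep1 : (pvDish r0 :: mrest.map pvDish).foldl pvStepA
        (PySem.Dict.empty, pvDish ((r0 :: mrest).headD []))
      = (mrest.map pvDish).foldl pvStepA
        ((pvStepA (PySem.Dict.empty, pvDish r0) (pvDish r0)).1, pvDish r0) := by
    rw [List.foldl_cons]
    congr 1
    rw [show (r0 :: mrest).headD [] = r0 from rfl]
    exact Prod.ext rfl hst2
  rw [hstep1, hmain]
  have hds_ne : (pvDish r0 :: mrest.map pvDish) ≠ [] := by simp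
  have htop := pvTop_eq (pvDish r0 :: mrest.map pvDish) hds_ne
  rw [htop]
  have hff := pvFindFirst_eq (pvDish r0 :: mrest.map pvDish) PySem.Dict.empty
    (fun _ => 0) (pvMaxRun (pvDish r0 :: mrest.map pvDish))
    (fun x => by simp [PySem.Dict.getD_empty])
  rw [hff]
  simp
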